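-- pv_equiv track=rewrite | github.com/dcschenc/myleetcode | 0793-swap-adjacent-in-lr-string/0793-swap-adjacent-in-lr-string.py | canTransform
-- ===== SOURCE A (Python) =====
-- def canTransform(start: str, end: str) -> bool:
--     # https://github.com/doocs/leetcode/tree/main/solution/0700-0799/0777.Swap%20Adjacent%20in%20LR%20String
--     # First, check if the non-'X' characters match
--     if start.replace('X', '') != end.replace('X', ''):
--         return False
--
--     # Now, check the valid moves for 'L' and 'R'
--     i, j = 0, 0
--     n = len(start)
--
--     while i < n and j < n:
--         # Skip all 'X' in both strings
--         while i < n and start[i] == 'X':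
--             i += 1
--         while j < n and end[j] == 'X':
--             j += 1
--
--         # If one string is exhausted while the other isn't, it's not possible
--         if (i < n) != (j < n):
--             return False
--
--         # If both pointers are valid, check the positions
--         if i < n and j < n:
--             if start[i] != end[j]:
--                 return False
--             # For 'L', i must be >= j since 'L' can only move left
--             if start[i] == 'L' and i < j:
--                 return False
--             # For 'R', i must be <= j since 'R' can only move right
--             if start[i] == 'R' and i > j:
--                 return False
--             i += 1
--             j += 1
--
--     return True
-- ===== SOURCE B (Python) =====
-- def canTransform(start: str, end: str) -> bool:
--     if start.replace('X', '') != end.replace('X', ''):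
--         return False
--     # prefix-count invariant: at every prefix, start may not have more L's
--     # (L only moves left) nor fewer R's (R only moves right) than end
--     ls = le = rs = re = 0
--     for a, b in zip(start, end):
--         if a == 'L':
--             ls += 1
--         elif a == 'R':
--             rs += 1
--         if b == 'L':
--             le += 1
--         elif b == 'R':
--             re += 1
--         if ls > le or rs < re:
--             return False
--     return True
-- ===== Notes on version B (the rewrite author's own statement) =====
-- stated objective: alternative
-- what changed: Replaces A's two-pointer scan that skips X's and compares the indices of each matched non-X pair by the prefix-count invariant: one aligned pass over zip(start, end) maintaining running counts of L and R in both prefixes, failing as soon as start's prefix has more L's or fewer R's than end's.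
-- outside the precondition, e.g. on canTransform('LX', 'L'): A raises IndexError, B returns True; on canTransform('R', 'XR'): A returns False, B returns True
import Mathlib
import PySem

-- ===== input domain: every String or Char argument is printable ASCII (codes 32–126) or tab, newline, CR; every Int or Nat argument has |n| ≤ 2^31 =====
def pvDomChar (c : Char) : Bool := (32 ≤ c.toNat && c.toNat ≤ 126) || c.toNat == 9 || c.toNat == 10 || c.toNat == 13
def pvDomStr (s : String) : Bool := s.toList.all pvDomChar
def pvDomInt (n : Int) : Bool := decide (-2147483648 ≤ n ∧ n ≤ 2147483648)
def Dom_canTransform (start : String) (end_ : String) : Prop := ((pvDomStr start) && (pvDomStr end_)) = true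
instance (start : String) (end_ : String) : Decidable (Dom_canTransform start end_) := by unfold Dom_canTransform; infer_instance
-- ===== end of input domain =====

-- B replaces A's two-pointer scan (skip X's, compare the indices of each matched
-- non-X pair) by a single aligned pass over zip(start, end) maintaining running
-- counts of 'L' and 'R' in both prefixes (the classic prefix-count invariant).

-- ===== PORT A =====

-- inner `while i < n and start[i] == 'X': i += 1` (indexing is in range whenever i < n = length, so getD
-- is exact; the fuel argument only bounds the ≤ n iterations and is never exhausted at the call sites)
def skipX (cs : List Char) (n : Nat) : Nat → Nat → Nat
  | 0, i => i
  | fuel + 1, i => if i < n ∧ cs.getD i ' ' = 'X' then skipX cs n fuel (i + 1) else i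

-- A's outer while loop over the two pointers i, j (n = len(start) as in the Python); each iteration
-- advances i, so fuel n + 1 is never exhausted
def loopA (s e : List Char) (n : Nat) : Nat → Nat → Nat → Bool
  | 0, _, _ => true
  | fuel + 1, i, j =>
    if i < n ∧ j < n then
      let i' := skipX s n n i
      let j' := skipX e n n j
      if decide (i' < n) ≠ decide (j' < n) then false
      else if i' < n ∧ j' < n then
        if s.getD i' ' ' ≠ e.getD j' ' ' then false
        else if s.getD i' ' ' = 'L' ∧ i' < j' then false
        else if s.getD i' ' ' = 'R' ∧ i' > j' then false
        else loopA s e n fuel (i' + 1) (j' + 1)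
      else true
    else true

def canTransform (start : String) (end_ : String) : Bool :=
  if PySem.Str.replace start "X" "" ≠ PySem.Str.replace end_ "X" "" then false
  else loopA start.toList end_.toList start.toList.length (start.toList.length + 1) 0 0

-- ===== PORT B =====

-- the if/elif pair updating (countL, countR) for one character
def bump (c : Char) (l r : Int) : Int × Int :=
  if c = 'L' then (l + 1, r) else if c = 'R' then (l, r + 1) else (l, r)

-- B's for-loop over zip(start, end) with the four running counters and early exit
def loopB : List (Char × Char) → Int → Int → Int → Int → Bool
  | [], _, _, _, _ => true
  | ab :: t, ls, le, rs, re =>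
    let ps := bump ab.1 ls rs
    let pe := bump ab.2 le re
    if ps.1 > pe.1 ∨ ps.2 < pe.2 then false
    else loopB t ps.1 pe.1 ps.2 pe.2

def canTransform_alt (start : String) (end_ : String) : Bool :=
  if PySem.Str.replace start "X" "" ≠ PySem.Str.replace end_ "X" "" then false
  else loopB (start.toList.zip end_.toList) 0 0 0 0

-- ===== PRECONDITION & SPEC =====
-- Pre_ excludes inputs of unequal length whose non-'X' subsequences coincide: there A's
-- loop, bounded by len(start) on both strings, can index end past its length (IndexError)
-- or return a value shaped by that spurious bound, while B's value is the natural one.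
def Pre_canTransform (start : String) (end_ : String) : Prop :=
  start.toList.length = end_.toList.length ∨
    start.toList.filter (fun c => c ≠ 'X') ≠ end_.toList.filter (fun c => c ≠ 'X')
instance (start : String) (end_ : String) : Decidable (Pre_canTransform start end_) := by
  unfold Pre_canTransform; infer_instance

def pvWitness_canTransform : String × String := ("RXL", "XRL")

def Spec_canTransform (start : String) (end_ : String) (out : Bool) : Prop := out = canTransform_alt start end_
instance (start : String) (end_ : String) (out : Bool) : Decidable (Spec_canTransform start end_ out) := by unfold Spec_canTransform; infer_instance

-- ===== CLAIM (what is proved, stated in full; the proofs are below) =====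
def Claim_equal_canTransform : Prop := ∀ (start : String) (end_ : String), Dom_canTransform start end_ → Pre_canTransform start end_ → Spec_canTransform start end_ (canTransform start end_)

-- ===== LEMMAS AND PROOFS =====

-- the (index, char) pairs of the non-'X' characters at positions ≥ i
def posF (cs : List Char) (i : Nat) : List (Int × Char) :=
  (PySem.List.enumerate (cs.drop i) i).filter (fun p => p.2 ≠ 'X')

def chk (pq : (Int × Char) × (Int × Char)) : Bool :=
  !decide (pq.1.2 = 'L' ∧ pq.1.1 < pq.2.1) && !decide (pq.1.2 = 'R' ∧ pq.1.1 > pq.2.1)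

-- indices at which character c occurs in cs
def occ (c : Char) (cs : List Char) : List Int :=
  ((PySem.List.enumerate cs 0).filter (fun p => p.2 = c)).map Prod.fst

-- number of occurrences of c in cs
def cnt (c : Char) (cs : List Char) : Nat := cs.countP (fun x => x = c)

theorem posF_ge (cs : List Char) (i : Nat) (h : cs.length ≤ i) : posF cs i = [] := by
  simp [posF, List.drop_eq_nil_of_le h, PySem.List.enumerate_nil]

theorem drop_cons_getD (cs : List Char) (i : Nat) (h : i < cs.length) :
    cs.drop i = cs.getD i ' ' :: cs.drop (i + 1) := by
  rw [List.getD_eq_getElem cs ' ' h]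
  exact List.drop_eq_getElem_cons h

theorem posF_stepX (cs : List Char) (i : Nat) (h : i < cs.length) (hx : cs.getD i ' ' = 'X') :
    posF cs i = posF cs (i + 1) := by
  unfold posF
  rw [drop_cons_getD cs i h, PySem.List.enumerate_cons]
  rw [List.getD_eq_getElem?_getD] at hx
  simp [hx]

theorem posF_step (cs : List Char) (i : Nat) (h : i < cs.length) (hx : cs.getD i ' ' ≠ 'X') :
    posF cs i = ((i : Int), cs.getD i ' ') :: posF cs (i + 1) := by
  unfold posF
  rw [drop_cons_getD cs i h, PySem.List.enumerate_cons]
  rw [List.getD_eq_getElem?_getD] at hx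
  simp [List.getD_eq_getElem?_getD, hx]

theorem le_skipX (cs : List Char) (n : Nat) :
    ∀ (fuel i : Nat), i ≤ skipX cs n fuel i := by
  intro fuel
  induction fuel with
  | zero =>
    intro i
    simp only [skipX]
    omega
  | succ f ih =>
    intro i
    rw [skipX]
    split
    next => have := ih (i + 1); omega
    next => exact Nat.le_refl i

theorem skipX_spec (cs : List Char) (n : Nat) (hn : n = cs.length) :
    ∀ (fuel i : Nat), i ≤ n → n - i ≤ fuel →
    posF cs i = posF cs (skipX cs n fuel i) ∧
    (skipX cs n fuel i < n → cs.getD (skipX cs n fuel i) ' ' ≠ 'X') ∧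
    skipX cs n fuel i ≤ n := by
  intro fuel
  induction fuel with
  | zero =>
    intro i hi hf
    simp only [skipX]
    refine ⟨trivial, ?_, hi⟩
    intro hlt
    exact absurd hlt (by omega)
  | succ f ih =>
    intro i hi hf
    rw [skipX]
    split
    next hc =>
      have := ih (i + 1) (by omega) (by omega)
      refine ⟨?_, this.2.1, this.2.2⟩
      rw [posF_stepX cs i (by omega) hc.2]
      exact this.1
    next hc =>
      refine ⟨rfl, ?_, hi⟩
      intro hlt hx
      exact hc ⟨hlt, hx⟩

theorem loop_eq (s e : List Char) (hn : s.length = e.length) :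
    ∀ (fuel i j : Nat), s.length - i < fuel → i ≤ s.length → j ≤ s.length →
    (posF s i).map Prod.snd = (posF e j).map Prod.snd →
    loopA s e s.length fuel i j = ((posF s i).zip (posF e j)).all chk := by
  intro fuel
  induction fuel with
  | zero => intro i j hk; omega
  | succ k ih =>
    intro i j hk hi hj hm
    by_cases hcond : i < s.length ∧ j < s.length
    · obtain ⟨ha1, ha2, ha3⟩ := skipX_spec s s.length rfl s.length i (by omega) (by omega)
      obtain ⟨hb1, hb2, hb3⟩ := skipX_spec e s.length hn s.length j (by omega) (by omega)
      rw [loopA, if_pos hcond]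
      simp only []
      by_cases hi' : skipX s s.length s.length i < s.length
      · have hx := ha2 hi'
        rw [posF_step s _ hi' hx] at ha1
        by_cases hj' : skipX e s.length s.length j < s.length
        · have hy := hb2 hj'
          rw [posF_step e _ (by omega) hy] at hb1
          rw [if_neg (by simp [hi', hj'])]
          rw [if_pos ⟨hi', hj'⟩]
          rw [ha1, hb1] at hm
          simp only [List.map_cons, List.cons.injEq] at hm
          obtain ⟨hab, htl⟩ := hm
          rw [if_neg (by simp only [ne_eq, not_not]; exact hab)]
          rw [ha1, hb1]
          by_cases hL : s.getD (skipX s s.length s.length i) ' ' = 'L' ∧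
              skipX s s.length s.length i < skipX e s.length s.length j
          · rw [if_pos hL]
            obtain ⟨hL1, hL2⟩ := hL
            rw [List.getD_eq_getElem?_getD] at hL1
            simp [chk, hL1, hL2]
          · rw [if_neg hL]
            by_cases hR : s.getD (skipX s s.length s.length i) ' ' = 'R' ∧
                skipX s s.length s.length i > skipX e s.length s.length j
            · rw [if_pos hR]
              obtain ⟨hR1, hR2⟩ := hR
              rw [List.getD_eq_getElem?_getD] at hR1
              simp [chk, hR1, hR2]
            · rw [if_neg hR]
              have hrec := ih (skipX s s.length s.length i + 1) (skipX e s.length s.length j + 1)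
                (by have := le_skipX s s.length s.length i; omega) (by omega) (by omega) htl
              rw [hrec]
              simp only [List.zip_cons_cons, List.all_cons]
              have hchk : chk (((skipX s s.length s.length i : Int), s.getD (skipX s s.length s.length i) ' '),
                  ((skipX e s.length s.length j : Int), e.getD (skipX e s.length s.length j) ' ')) = true := by
                simp only [chk, Bool.and_eq_true, Bool.not_eq_true', decide_eq_false_iff_not]
                constructor
                · intro hc; exact hL ⟨hc.1, by exact_mod_cast hc.2⟩
                · intro hc; exact hR ⟨hc.1, by exact_mod_cast hc.2⟩
              rw [hchk]
              simp
        · -- start has a non-X char left, end does not: contradicts the map equality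
          have he0 : posF e (skipX e s.length s.length j) = [] := posF_ge e _ (by omega)
          rw [ha1, hb1, he0] at hm
          simp at hm
      · by_cases hj' : skipX e s.length s.length j < s.length
        · have hy := hb2 hj'
          rw [posF_step e _ (by omega) hy] at hb1
          have hs0 : posF s (skipX s s.length s.length i) = [] := posF_ge s _ (by omega)
          rw [ha1, hs0, hb1] at hm
          simp at hm
        · have hs0 : posF s (skipX s s.length s.length i) = [] := posF_ge s _ (by omega)
          have he0 : posF e (skipX e s.length s.length j) = [] := posF_ge e _ (by omega)
          rw [if_neg (by simp [hi', hj'])]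
          rw [if_neg (by intro hc; exact hi' hc.1)]
          rw [ha1, hb1, hs0, he0]
          simp
    · rw [loopA, if_neg hcond]
      have h0 : posF s i = [] ∧ posF e j = [] := by
        rcases Nat.lt_or_ge i s.length with hlt | hge
        · have hje : e.length ≤ j := by omega
          have he0 : posF e j = [] := posF_ge e j hje
          rw [he0] at hm
          refine ⟨?_, he0⟩
          cases hme : posF s i with
          | nil => rfl
          | cons a t => rw [hme] at hm; simp at hm
        · have hs0 : posF s i = [] := posF_ge s i hge
          rw [hs0] at hm
          refine ⟨hs0, ?_⟩
          cases hme : posF e j with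
          | nil => rfl
          | cons a t => rw [hme] at hm; simp at hm
      rw [h0.1, h0.2]
      simp

theorem map_snd_filter_enum (cs : List Char) :
    ∀ (s : Int), ((PySem.List.enumerate cs s).filter (fun p => p.2 ≠ 'X')).map Prod.snd
      = cs.filter (fun c => c ≠ 'X') := by
  induction cs with
  | nil => intro s; simp [PySem.List.enumerate_nil]
  | cons c t ih =>
    intro s
    rw [PySem.List.enumerate_cons]
    by_cases hc : c = 'X' <;> simp [hc] <;> simpa using ih (s + 1)

theorem map_snd_posF (cs : List Char) :
    (posF cs 0).map Prod.snd = cs.filter (fun c => c ≠ 'X') := by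
  simpa [posF] using map_snd_filter_enum cs 0

theorem replace_go_X : ∀ (fuel : Nat) (l acc : List Char), l.length ≤ fuel →
    PySem.Chars.replace.go ['X'] [] fuel l acc = acc.reverse ++ l.filter (fun c => c ≠ 'X') := by
  intro fuel
  induction fuel with
  | zero =>
    intro l acc h
    have hl : l = [] := List.eq_nil_of_length_eq_zero (by omega)
    subst hl
    rw [PySem.Chars.replace.go.eq_def]
    simp
  | succ f ih =>
    intro l acc h
    cases l with
    | nil => rw [PySem.Chars.replace.go.eq_def]; simp
    | cons c t =>
      rw [PySem.Chars.replace.go.eq_def]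
      by_cases hc : c = 'X'
      · have hp : List.isPrefixOf ['X'] (c :: t) = true := by
          simp [List.isPrefixOf, hc]
        simp only [hp, if_true]
        simp only [List.length, List.drop_succ_cons, List.drop_zero, List.reverse_nil,
          List.nil_append]
        rw [ih t acc (by simpa using Nat.le_of_succ_le_succ h)]
        simp [hc]
      · have hp : List.isPrefixOf ['X'] (c :: t) = false := by
          simp [List.isPrefixOf]
          intro hcc
          exact absurd hcc.symm hc
        simp only [hp, Bool.false_eq_true, if_false]
        rw [ih t (c :: acc) (by simpa using Nat.le_of_succ_le_succ h)]
        simp [hc]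

theorem toList_replace_X (s : String) :
    (PySem.Str.replace s "X" "").toList = s.toList.filter (fun c => c ≠ 'X') := by
  rw [PySem.Str.toList_replace]
  have hx : ("X" : String).toList = ['X'] := rfl
  have he : ("" : String).toList = [] := rfl
  rw [hx, he, PySem.Chars.replace]
  rw [if_neg (by simp)]
  exact replace_go_X s.toList.length s.toList [] (Nat.le_refl _)

-- ===== new lemmas for the B side =====

theorem bump_fst (c : Char) (l r : Int) : (bump c l r).1 = l + (if c = 'L' then 1 else 0) := by
  unfold bump; split_ifs <;> simp_all

theorem bump_snd (c : Char) (l r : Int) : (bump c l r).2 = r + (if c = 'R' then 1 else 0) := by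
  unfold bump; split_ifs <;> simp_all

theorem cnt_cons (c x : Char) (t : List Char) :
    cnt c (x :: t) = cnt c t + (if x = c then 1 else 0) := by
  simp [cnt, List.countP_cons]

-- loopB over zip(s,e) holds iff the prefix-count invariant holds at every non-empty prefix
theorem loopB_iff : ∀ (s e : List Char) (ls le rs re : Int),
    (loopB (s.zip e) ls le rs re = true ↔
      ∀ p : Nat, 0 < p → p ≤ s.length → p ≤ e.length →
        ls + (cnt 'L' (s.take p) : Int) ≤ le + (cnt 'L' (e.take p) : Int) ∧
        re + (cnt 'R' (e.take p) : Int) ≤ rs + (cnt 'R' (s.take p) : Int)) := by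
  intro s
  induction s with
  | nil =>
    intro e ls le rs re
    simp only [List.zip_nil_left, loopB, List.length_nil]
    constructor
    · intro _ p hp hps _; omega
    · intro _; trivial
  | cons a s' ih =>
    intro e ls le rs re
    cases e with
    | nil =>
      simp only [List.zip_nil_right, loopB, List.length_nil]
      constructor
      · intro _ p hp _ hpe; omega
      · intro _; trivial
    | cons b e' =>
      rw [List.zip_cons_cons, loopB]
      simp only [bump_fst, bump_snd]
      by_cases hbad : ls + (if a = 'L' then (1:Int) else 0) > le + (if b = 'L' then (1:Int) else 0) ∨
          rs + (if a = 'R' then (1:Int) else 0) < re + (if b = 'R' then (1:Int) else 0)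
      · rw [if_pos hbad]
        simp only [Bool.false_eq_true, false_iff]
        intro hall
        have h1 := hall 1 (by omega) (by simp) (by simp)
        simp only [List.take_succ_cons, List.take_zero] at h1
        rw [cnt_cons, cnt_cons, cnt_cons, cnt_cons] at h1
        simp only [cnt, List.countP_nil] at h1
        push_cast at h1
        omega
      · rw [if_neg hbad]
        rw [ih e' _ _ _ _]
        constructor
        · intro h p hp hps hpe
          cases p with
          | zero => omega
          | succ p' =>
            simp only [List.take_succ_cons]
            rw [cnt_cons, cnt_cons, cnt_cons, cnt_cons]
            cases Nat.eq_zero_or_pos p' with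
            | inl h0 =>
              subst h0
              simp only [List.take_zero, cnt, List.countP_nil]
              push_cast
              omega
            | inr hpos =>
              have := h p' hpos (by simpa using hps) (by simpa using hpe)
              push_cast
              omega
        · intro h p hp hps hpe
          have := h (p + 1) (by omega) (by simpa using hps) (by simpa using hpe)
          simp only [List.take_succ_cons] at this
          rw [cnt_cons, cnt_cons, cnt_cons, cnt_cons] at this
          push_cast at this
          push_cast
          omega

-- zip-all as a pointwise condition
theorem zip_all_iff {α β : Type} (f : α × β → Bool) :
    ∀ (a : List α) (b : List β), ((a.zip b).all f = true ↔
      ∀ (k : Nat) (h : k < a.length) (h' : k < b.length), f (a[k], b[k]) = true) := by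
  intro a
  induction a with
  | nil => intro b; simp
  | cons x a' ih =>
    intro b
    cases b with
    | nil => simp
    | cons y b' =>
      rw [List.zip_cons_cons, List.all_cons, Bool.and_eq_true, ih b']
      constructor
      · rintro ⟨h0, hrest⟩ k hk hk'
        cases k with
        | zero => simpa using h0
        | succ k' => simpa using hrest k' (by simpa using hk) (by simpa using hk')
      · intro h
        refine ⟨by simpa using h 0 (by simp) (by simp), ?_⟩
        intro k hk hk'
        simpa using h (k + 1) (by simpa using hk) (by simpa using hk')

-- pointwise domination gives a countP inequality (no sortedness needed)
theorem countP_le_pointwise : ∀ (u v : List Int),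
    u.length = v.length →
    (∀ (k : Nat) (h : k < u.length) (h' : k < v.length), v[k] ≤ u[k]) →
    ∀ p : Int, u.countP (fun x => decide (x < p)) ≤ v.countP (fun x => decide (x < p)) := by
  intro u
  induction u with
  | nil => intro v h _ p; simp
  | cons x u' ih =>
    intro v hlen hpt p
    cases v with
    | nil => simp at hlen
    | cons y v' =>
      rw [List.countP_cons, List.countP_cons]
      have h0 : y ≤ x := by simpa using hpt 0 (by simp) (by simp)
      have htl := ih v' (by simpa using hlen)
        (fun k hk hk' => by simpa using hpt (k + 1) (by simpa using hk) (by simpa using hk')) p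
      have hdx := decide_eq_true_eq (p := x < p)
      by_cases hx : x < p
      · have hy : y < p := by omega
        rw [decide_eq_true hx, decide_eq_true hy]
        simp only [if_true]
        omega
      · rw [decide_eq_false hx]
        simp only [Bool.false_eq_true, if_false, add_zero]
        by_cases hy : y < p
        · rw [decide_eq_true hy]; simp only [if_true]; omega
        · rw [decide_eq_false hy]; simp only [Bool.false_eq_true, if_false, add_zero]; omega

-- on a strictly increasing list, k+1 ≤ countP (< p) forces v[k] < p
theorem sorted_countP_le : ∀ (v : List Int), v.Pairwise (· < ·) →
    ∀ (k : Nat) (p : Int) (h : k < v.length), p ≤ v[k] →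
    v.countP (fun x => decide (x < p)) ≤ k := by
  intro v
  induction v with
  | nil => intro _ k p h; simp at h
  | cons y v' ih =>
    intro hs k p hk hp
    rw [List.countP_cons]
    rcases List.pairwise_cons.mp hs with ⟨hhead, htail⟩
    cases k with
    | zero =>
      simp only [List.getElem_cons_zero] at hp
      have h0 : v'.countP (fun x => decide (x < p)) = 0 := by
        apply List.countP_eq_zero.mpr
        intro x hx
        have := hhead x hx
        simp only [decide_eq_true_eq]
        omega
      simp only [h0]
      have : ¬ (y < p) := by omega
      simp [this]
    | succ k' =>
      simp only [List.getElem_cons_succ] at hp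
      have := ih htail k' p (by simpa using hk) hp
      split <;> omega

-- on a strictly increasing list, v[k] < p forces k+1 ≤ countP (< p)
theorem sorted_countP_ge : ∀ (v : List Int), v.Pairwise (· < ·) →
    ∀ (k : Nat) (p : Int) (h : k < v.length), v[k] < p →
    k + 1 ≤ v.countP (fun x => decide (x < p)) := by
  intro v
  induction v with
  | nil => intro _ k p h; simp at h
  | cons y v' ih =>
    intro hs k p hk hp
    rw [List.countP_cons]
    rcases List.pairwise_cons.mp hs with ⟨hhead, htail⟩
    cases k with
    | zero =>
      simp only [List.getElem_cons_zero] at hp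
      simp [hp]
    | succ k' =>
      simp only [List.getElem_cons_succ] at hp
      have := ih htail k' p (by simpa using hk) hp
      have hk2 : k' < v'.length := by simpa using hk
      have hy : y < p := by
        have := hhead _ (List.getElem_mem hk2)
        omega
      have hdy : (decide (y < p)) = true := decide_eq_true hy
      simp only [hdy, if_true]
      omega

-- occ c cs is strictly increasing
theorem occ_pairwise (c : Char) (cs : List Char) : (occ c cs).Pairwise (· < ·) := by
  unfold occ
  exact ((PySem.List.pairwise_lt_enumerate cs 0).filter _).map _ (fun _ _ h => h)

-- elements of occ c cs are in [0, cs.length)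
theorem occ_mem_bounds (c : Char) (cs : List Char) :
    ∀ x ∈ occ c cs, 0 ≤ x ∧ x < (cs.length : Int) := by
  intro x hx
  unfold occ at hx
  rcases List.mem_map.mp hx with ⟨q, hq, hqx⟩
  rcases List.mem_filter.mp hq with ⟨hqm, _⟩
  rcases (PySem.List.mem_enumerate_iff _ _ _).mp hqm with ⟨k, hk, hkq⟩
  subst hkq
  simp only at hqx
  subst hqx
  constructor <;> simp <;> omega

-- countP (< p) over occ c cs equals the count of c in the length-p prefix
theorem countP_occ_eq_cnt_take (c : Char) :
    ∀ (cs : List Char) (off : Int) (p : Nat),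
      ((((PySem.List.enumerate cs off).filter (fun q => q.2 = c)).map Prod.fst).countP
        (fun x => decide (x < off + p))) = cnt c (cs.take p) := by
  intro cs
  induction cs with
  | nil => intro off p; simp [PySem.List.enumerate_nil, cnt]
  | cons x t ih =>
    intro off p
    rw [PySem.List.enumerate_cons]
    cases p with
    | zero =>
      simp only [Nat.cast_zero, add_zero, List.take_zero, cnt, List.countP_nil]
      apply List.countP_eq_zero.mpr
      intro z hz
      rcases List.mem_map.mp hz with ⟨q, hq, hqz⟩
      rcases List.mem_filter.mp hq with ⟨hqm, _⟩
      subst hqz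
      simp only [decide_eq_true_eq]
      rcases List.mem_cons.mp hqm with h | h
      · subst h; omega
      · rcases (PySem.List.mem_enumerate_iff _ _ _).mp h with ⟨k, hk, hkq⟩
        subst hkq
        simp only
        omega
    | succ p' =>
      have hoff : off + ((p' + 1 : Nat) : Int) = (off + 1) + (p' : Nat) := by push_cast; ring
      rw [List.take_succ_cons, cnt_cons]
      by_cases hc : x = c
      · rw [List.filter_cons_of_pos (by simpa using hc), List.map_cons, List.countP_cons]
        rw [hoff, ih (off + 1) p']
        have : (decide (off < off + 1 + (p' : Nat))) = true := by
          simp only [decide_eq_true_eq]; omega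
        simp [hc, this]
      · rw [List.filter_cons_of_neg (by simpa using hc)]
        rw [hoff, ih (off + 1) p']
        simp [hc]

theorem countP_occ (c : Char) (cs : List Char) (p : Nat) :
    (occ c cs).countP (fun x => decide (x < (p : Int))) = cnt c (cs.take p) := by
  have := countP_occ_eq_cnt_take c cs 0 p
  simpa [occ] using this

-- split the pair check over matched chars into the L-part and the R-part
theorem all_chk_split : ∀ (u v : List (Int × Char)),
    u.map Prod.snd = v.map Prod.snd →
    ((u.zip v).all chk =
      (((u.filter (fun q => q.2 = 'L')).zip (v.filter (fun q => q.2 = 'L'))).all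
        (fun pq => decide (pq.2.1 ≤ pq.1.1)) &&
       ((u.filter (fun q => q.2 = 'R')).zip (v.filter (fun q => q.2 = 'R'))).all
        (fun pq => decide (pq.1.1 ≤ pq.2.1)))) := by
  intro u
  induction u with
  | nil =>
    intro v hm
    have : v = [] := by
      cases v with
      | nil => rfl
      | cons a t => simp at hm
    subst this; simp
  | cons x u' ih =>
    intro v hm
    cases v with
    | nil => simp at hm
    | cons y v' =>
      simp only [List.map_cons, List.cons.injEq] at hm
      obtain ⟨hxy, htl⟩ := hm
      rw [List.zip_cons_cons, List.all_cons]
      by_cases hL : x.2 = 'L'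
      · have hyL : y.2 = 'L' := by rw [← hxy]; exact hL
        rw [List.filter_cons_of_pos (by simpa using hL),
            List.filter_cons_of_pos (by simpa using hyL),
            List.filter_cons_of_neg (by simp [hL]),
            List.filter_cons_of_neg (by simp [hyL])]
        rw [List.zip_cons_cons, List.all_cons, ih v' htl]
        have hchk : chk (x, y) = decide (y.1 ≤ x.1) := by
          simp only [chk, hL]
          have : ¬ ('L' = 'R') := by decide
          simp only [this, false_and, decide_false, Bool.not_false, Bool.and_true,
            true_and]
          rcases lt_or_ge x.1 y.1 with h | h
          · simp only [h, decide_true, Bool.not_true]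
            symm; simp only [decide_eq_false_iff_not]; omega
          · have : ¬ (x.1 < y.1) := by omega
            simp only [this, decide_false, Bool.not_false]
            symm; simp only [decide_eq_true_eq]; omega
        rw [hchk]
        cases h1 : decide (y.1 ≤ x.1) <;> simp
      · by_cases hR : x.2 = 'R'
        · have hyR : y.2 = 'R' := by rw [← hxy]; exact hR
          rw [List.filter_cons_of_neg (by simp [hR]),
              List.filter_cons_of_neg (by
                have : y.2 ≠ 'L' := by rw [← hxy]; exact hL
                simp [this]),
              List.filter_cons_of_pos (by simpa using hR),
              List.filter_cons_of_pos (by simpa using hyR)]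
          rw [List.zip_cons_cons, List.all_cons, ih v' htl]
          have hchk : chk (x, y) = decide (x.1 ≤ y.1) := by
            simp only [chk, hR]
            have hne : ('R' : Char) ≠ 'L' := by decide
            simp only [hne, false_and, decide_false, Bool.not_false, Bool.true_and,
              true_and]
            rcases lt_or_ge y.1 x.1 with h | h
            · have : x.1 > y.1 := h
              simp only [this, decide_true, Bool.not_true]
              symm; simp only [decide_eq_false_iff_not]; omega
            · have : ¬ (x.1 > y.1) := by omega
              simp only [this, decide_false, Bool.not_false]
              symm; simp only [decide_eq_true_eq]; omega
          rw [hchk]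
          cases h1 : decide (x.1 ≤ y.1) <;> simp [Bool.and_left_comm]
        · have hyL : y.2 ≠ 'L' := by rw [← hxy]; exact hL
          have hyR : y.2 ≠ 'R' := by rw [← hxy]; exact hR
          rw [List.filter_cons_of_neg (by simpa using hL),
              List.filter_cons_of_neg (by simpa using hyL),
              List.filter_cons_of_neg (by simpa using hR),
              List.filter_cons_of_neg (by simpa using hyR)]
          rw [ih v' htl]
          have hchk : chk (x, y) = true := by
            simp [chk, hL, hR]
          rw [hchk, Bool.true_and]

-- posF filtered down to one letter c ∈ {L, R} is the enumerate-filter at c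
theorem posF_filter_eq (c : Char) (hc : c ≠ 'X') (cs : List Char) :
    (posF cs 0).filter (fun q => q.2 = c) = (PySem.List.enumerate cs 0).filter (fun q => q.2 = c) := by
  unfold posF
  rw [List.filter_filter]
  congr 1
  funext q
  by_cases h : q.2 = c
  · simp [h, hc]
  · simp [h]

-- fst of the k-th element of the one-letter filter is occ[k]
theorem getElem_filter_fst (c : Char) (cs : List Char) (k : Nat)
    (h : k < ((PySem.List.enumerate cs 0).filter (fun q => q.2 = c)).length) :
    ((PySem.List.enumerate cs 0).filter (fun q => q.2 = c))[k].1
      = (occ c cs)[k]'(by simpa [occ] using h) := by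
  simp [occ]

-- length of the one-letter filter equals cnt via map snd
theorem length_filter_eq_cnt (c : Char) (cs : List Char) :
    ((PySem.List.enumerate cs 0).filter (fun q => q.2 = c)).length = cnt c cs := by
  rw [← List.countP_eq_length_filter, cnt]
  conv_rhs => rw [← PySem.List.map_snd_enumerate cs 0]
  rw [List.countP_map]
  rfl

theorem length_occ (c : Char) (cs : List Char) : (occ c cs).length = cnt c cs := by
  rw [occ, List.length_map, length_filter_eq_cnt]

-- counting a non-'X' letter is unchanged by dropping the X's
theorem cnt_filter (c : Char) (hc : c ≠ 'X') (cs : List Char) :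
    cnt c (cs.filter (fun x => x ≠ 'X')) = cnt c cs := by
  rw [cnt, cnt, List.countP_filter]
  congr 1
  funext a
  by_cases ha : a = c
  · subst ha; simp [hc]
  · simp [ha]

-- strict sortedness + prefix-count inequalities give pointwise index domination
theorem pointwise_of_countP (u v : List Int) (hu : u.Pairwise (· < ·)) (hv : v.Pairwise (· < ·))
    (H : ∀ (k : Nat) (h : k < u.length),
      u.countP (fun x => decide (x < u[k] + 1)) ≤ v.countP (fun x => decide (x < u[k] + 1))) :
    ∀ (k : Nat) (h : k < u.length) (h' : k < v.length), v[k] ≤ u[k] := by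
  intro k h h'
  by_contra hcon
  rw [not_le] at hcon
  have h1 : k + 1 ≤ u.countP (fun x => decide (x < u[k] + 1)) :=
    sorted_countP_ge u hu k (u[k] + 1) h (by omega)
  have h2 : v.countP (fun x => decide (x < u[k] + 1)) ≤ k :=
    sorted_countP_le v hv k (u[k] + 1) h' (by omega)
  have := H k h
  omega

-- occ elements pointwise: pick p = u[k]+1 as the Nat prefix length
theorem occ_getElem_bounds (c : Char) (cs : List Char) (k : Nat) (h : k < (occ c cs).length) :
    0 ≤ (occ c cs)[k] ∧ (occ c cs)[k] < (cs.length : Int) :=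
  occ_mem_bounds c cs _ (List.getElem_mem h)

-- the core bridge: matched-pair index conditions ⟺ prefix-count conditions
theorem bridge (s e : List Char) (hn : s.length = e.length)
    (hf : s.filter (fun c => c ≠ 'X') = e.filter (fun c => c ≠ 'X')) :
    ((posF s 0).zip (posF e 0)).all chk = loopB (s.zip e) 0 0 0 0 := by
  have hm : (posF s 0).map Prod.snd = (posF e 0).map Prod.snd := by
    rw [map_snd_posF, map_snd_posF, hf]
  rw [all_chk_split _ _ hm]
  rw [posF_filter_eq 'L' (by decide) s, posF_filter_eq 'L' (by decide) e,
      posF_filter_eq 'R' (by decide) s, posF_filter_eq 'R' (by decide) e]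
  have hcL : cnt 'L' s = cnt 'L' e := by
    rw [← cnt_filter 'L' (by decide) s, ← cnt_filter 'L' (by decide) e, hf]
  have hcR : cnt 'R' s = cnt 'R' e := by
    rw [← cnt_filter 'R' (by decide) s, ← cnt_filter 'R' (by decide) e, hf]
  rw [Bool.eq_iff_iff, Bool.and_eq_true, zip_all_iff, zip_all_iff, loopB_iff]
  have hlenL : (occ 'L' s).length = (occ 'L' e).length := by
    rw [length_occ, length_occ, hcL]
  have hlenR : (occ 'R' s).length = (occ 'R' e).length := by
    rw [length_occ, length_occ, hcR]
  have hfl : ∀ (c : Char) (cs : List Char),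
      ((PySem.List.enumerate cs 0).filter (fun q => q.2 = c)).length = (occ c cs).length := by
    intro c cs; rw [length_occ, length_filter_eq_cnt]
  constructor
  · -- matched-pair conditions → prefix-count invariant
    rintro ⟨hLall, hRall⟩ p hp hps hpe
    have hLpt : ∀ (k : Nat) (h : k < (occ 'L' s).length) (h' : k < (occ 'L' e).length),
        (occ 'L' e)[k] ≤ (occ 'L' s)[k] := by
      intro k h h'
      have := hLall k (by rw [hfl]; exact h) (by rw [hfl]; exact h')
      rw [getElem_filter_fst, getElem_filter_fst] at this
      exact decide_eq_true_eq.mp this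
    have hRpt : ∀ (k : Nat) (h : k < (occ 'R' e).length) (h' : k < (occ 'R' s).length),
        (occ 'R' s)[k] ≤ (occ 'R' e)[k] := by
      intro k h h'
      have := hRall k (by rw [hfl]; exact h') (by rw [hfl]; exact h)
      rw [getElem_filter_fst, getElem_filter_fst] at this
      exact decide_eq_true_eq.mp this
    have hL := countP_le_pointwise (occ 'L' s) (occ 'L' e) hlenL hLpt ((p : Int))
    have hR := countP_le_pointwise (occ 'R' e) (occ 'R' s) hlenR.symm hRpt ((p : Int))
    rw [countP_occ, countP_occ] at hL
    rw [countP_occ, countP_occ] at hR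
    constructor <;> [skip; skip] <;> push_cast <;> omega
  · -- prefix-count invariant → matched-pair conditions
    intro hQ
    have hQL : ∀ p : Nat, 0 < p → p ≤ s.length → p ≤ e.length →
        cnt 'L' (s.take p) ≤ cnt 'L' (e.take p) := by
      intro p hp h1 h2
      have := (hQ p hp h1 h2).1
      omega
    have hQR : ∀ p : Nat, 0 < p → p ≤ s.length → p ≤ e.length →
        cnt 'R' (e.take p) ≤ cnt 'R' (s.take p) := by
      intro p hp h1 h2
      have := (hQ p hp h1 h2).2
      omega
    constructor
    · intro k hk hk'
      rw [getElem_filter_fst, getElem_filter_fst, decide_eq_true_eq]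
      refine pointwise_of_countP (occ 'L' s) (occ 'L' e)
        (occ_pairwise 'L' s) (occ_pairwise 'L' e) ?_ k (by rw [← hfl]; exact hk)
        (by rw [← hfl]; exact hk')
      intro j hj
      obtain ⟨hj0, hjn⟩ := occ_getElem_bounds 'L' s j hj
      set x := (occ 'L' s)[j] with hxdef
      have hxp : ((x.toNat + 1 : Nat) : Int) = x + 1 := by omega
      have := hQL (x.toNat + 1) (by omega) (by omega) (by omega)
      have hcs := countP_occ 'L' s (x.toNat + 1)
      have hce := countP_occ 'L' e (x.toNat + 1)
      rw [hxp] at hcs hce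
      omega
    · intro k hk hk'
      rw [getElem_filter_fst, getElem_filter_fst, decide_eq_true_eq]
      refine pointwise_of_countP (occ 'R' e) (occ 'R' s)
        (occ_pairwise 'R' e) (occ_pairwise 'R' s) ?_ k (by rw [← hfl]; exact hk')
        (by rw [← hfl]; exact hk)
      intro j hj
      obtain ⟨hj0, hjn⟩ := occ_getElem_bounds 'R' e j hj
      set x := (occ 'R' e)[j] with hxdef
      have hxp : ((x.toNat + 1 : Nat) : Int) = x + 1 := by omega
      have := hQR (x.toNat + 1) (by omega) (by omega) (by omega)
      have hcs := countP_occ 'R' s (x.toNat + 1)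
      have hce := countP_occ 'R' e (x.toNat + 1)
      rw [hxp] at hcs hce
      omega

-- ===== VERDICT (by name: the statement is the Claim_ definition above) =====
theorem canTransform_spec : Claim_equal_canTransform := by
  intro start end_ hdom hpre
  unfold Spec_canTransform canTransform canTransform_alt
  by_cases hg : PySem.Str.replace start "X" "" ≠ PySem.Str.replace end_ "X" ""
  · rw [if_pos hg, if_pos hg]
  · rw [if_neg hg, if_neg hg]
    simp only [ne_eq, not_not] at hg
    have hf : start.toList.filter (fun c => c ≠ 'X') = end_.toList.filter (fun c => c ≠ 'X') := by
      rw [← toList_replace_X, ← toList_replace_X, hg]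
    have hn : start.toList.length = end_.toList.length := by
      cases hpre with
      | inl h => exact h
      | inr h => exact absurd hf h
    have hm : (posF start.toList 0).map Prod.snd = (posF end_.toList 0).map Prod.snd := by
      rw [map_snd_posF, map_snd_posF, hf]
    have hmain := loop_eq start.toList end_.toList hn (start.toList.length + 1) 0 0
      (by omega) (by omega) (by omega) hm
    rw [hmain]
    exact bridge start.toList end_.toList hn hf
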